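-- pv_equiv track=rewrite | github.com/ByronT14/Wordle-Solver | wordle_solver/wordle_functions.py | get_position_of_multiple_letters_opt
-- ===== SOURCE A (Python) =====
-- def get_position_of_multiple_letters_opt(entered_word, multiple_letters_list):
--     if len(multiple_letters_list) < 1:
--         multiple_letters_position_dict = dict()
--         return multiple_letters_position_dict
--     else:
--         multiple_letters_position_dict = {l: [pos for pos, char in enumerate(entered_word) if char == l]
--                                           for l in multiple_letters_list}
--         return multiple_letters_position_dict
-- ===== SOURCE B (Python) =====
-- def get_position_of_multiple_letters_opt(entered_word, multiple_letters_list):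
--     index = {}
--     for pos, char in enumerate(entered_word):
--         index.setdefault(char, []).append(pos)
--     items = []
--     seen = set()
--     for l in multiple_letters_list:
--         if l not in seen:
--             seen.add(l)
--             items.append((l, index.get(l, [])))
--     return dict(items)
-- ===== Notes on version B (the rewrite author's own statement) =====
-- stated objective: faster
-- what changed: Replaces the per-letter rescan of the word by a single enumerate pass building a char->positions index dict, then assembles the result as a seen-set-deduplicated list of (letter, positions) pairs fed to dict(), instead of a dict comprehension that rescans the word for each letter.
import Mathlib
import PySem

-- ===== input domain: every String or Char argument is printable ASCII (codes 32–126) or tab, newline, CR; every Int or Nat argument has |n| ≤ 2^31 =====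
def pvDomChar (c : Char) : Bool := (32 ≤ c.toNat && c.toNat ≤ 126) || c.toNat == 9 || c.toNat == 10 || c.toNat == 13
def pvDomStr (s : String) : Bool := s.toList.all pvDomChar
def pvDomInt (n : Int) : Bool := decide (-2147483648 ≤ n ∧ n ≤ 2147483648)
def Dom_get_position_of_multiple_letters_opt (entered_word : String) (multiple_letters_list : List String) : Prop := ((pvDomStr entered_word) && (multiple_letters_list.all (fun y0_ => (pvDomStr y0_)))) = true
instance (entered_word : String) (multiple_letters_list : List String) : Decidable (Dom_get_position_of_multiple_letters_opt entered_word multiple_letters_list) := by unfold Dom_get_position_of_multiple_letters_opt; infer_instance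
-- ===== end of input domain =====

-- B replaces A's per-letter rescan of the word by one index-building pass over the word plus a seen-set
-- deduplicating assembly loop producing the (letter, positions) pairs (same return value).


-- ===== PORT A =====
-- [pos for pos, char in enumerate(entered_word) if char == l]
def pvPositionsA (entered_word : String) (l : String) : List Int :=
  (PySem.List.enumerate entered_word.toList).foldl
    (fun acc p => if String.mk [p.2] == l then acc ++ [p.1] else acc) []

def get_position_of_multiple_letters_opt (entered_word : String) (multiple_letters_list : List String) : List (String × List Int) :=
  if multiple_letters_list.length < 1 then
    (PySem.Dict.empty : PySem.Dict String (List Int)).items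
  else
    (multiple_letters_list.foldl
      (fun d l => d.insert l (pvPositionsA entered_word l))
      (PySem.Dict.empty : PySem.Dict String (List Int))).items

-- ===== PORT B =====
-- index = {}; for pos, char in enumerate(entered_word): index.setdefault(char, []).append(pos)
def pvIndexB (entered_word : String) : PySem.Dict String (List Int) :=
  (PySem.List.enumerate entered_word.toList).foldl
    (fun d p => d.modify (String.mk [p.2]) [] (· ++ [p.1])) PySem.Dict.empty

-- items = []; seen = set(); for l in …: if l not in seen: seen.add(l); items.append((l, index.get(l, []))); return dict(items)
def get_position_of_multiple_letters_opt_alt (entered_word : String) (multiple_letters_list : List String) : List (String × List Int) :=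
  (PySem.Dict.ofList
    ((multiple_letters_list.foldl
        (fun (st : List (String × List Int) × PySem.Set String) l =>
          if PySem.Set.contains st.2 l then st
          else (st.1 ++ [(l, (pvIndexB entered_word).getD l [])], PySem.Set.add st.2 l))
        ([], PySem.Set.empty)).1)).items

-- ===== PRECONDITION & SPEC =====
def Spec_get_position_of_multiple_letters_opt (entered_word : String) (multiple_letters_list : List String) (out : List (String × List Int)) : Prop := out = get_position_of_multiple_letters_opt_alt entered_word multiple_letters_list
instance (entered_word : String) (multiple_letters_list : List String) (out : List (String × List Int)) : Decidable (Spec_get_position_of_multiple_letters_opt entered_word multiple_letters_list out) := by unfold Spec_get_position_of_multiple_letters_opt; infer_instance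

-- ===== CLAIM (what is proved, stated in full; the proofs are below) =====
def Claim_equal_get_position_of_multiple_letters_opt : Prop := ∀ (entered_word : String) (multiple_letters_list : List String), Dom_get_position_of_multiple_letters_opt entered_word multiple_letters_list → Spec_get_position_of_multiple_letters_opt entered_word multiple_letters_list (get_position_of_multiple_letters_opt entered_word multiple_letters_list)

-- ===== LEMMAS AND PROOFS =====

-- B's word index looked up at any key yields exactly A's per-letter comprehension.
theorem pvValue_eq (entered_word : String) (l : String) :
    (pvIndexB entered_word).getD l [] = pvPositionsA entered_word l := by
  unfold pvIndexB pvPositionsA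
  rw [PySem.List.foldl_append_if (fun q : Int × Char => String.mk [q.2] == l)
        (fun q : Int × Char => q.1)]
  rw [show (PySem.List.enumerate entered_word.toList).foldl
        (fun (d : PySem.Dict String (List Int)) p => d.modify (String.mk [p.2]) [] (· ++ [p.1]))
        PySem.Dict.empty
      = ((PySem.List.enumerate entered_word.toList).map (fun p => (String.mk [p.2], p.1))).foldl
          (fun d q => d.modify q.1 [] (· ++ [q.2])) PySem.Dict.empty from
        (List.foldl_map (f := fun (p : Int × Char) => (String.mk [p.2], p.1))
           (g := fun (d : PySem.Dict String (List Int)) q => d.modify q.1 [] (· ++ [q.2]))).symm]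
  rw [PySem.Dict.getD_foldl_modify_append]
  simp [List.filter_map, List.map_map, Function.comp_def]

-- B's dedup assembly loop computes the map over the growing seen-set.
theorem pvLoopB (g : String → List Int) (ls : List String) (seen : PySem.Set String) :
    ls.foldl
      (fun (st : List (String × List Int) × PySem.Set String) l =>
        if PySem.Set.contains st.2 l then st
        else (st.1 ++ [(l, g l)], PySem.Set.add st.2 l))
      (seen.map (fun l => (l, g l)), seen)
    = ((PySem.Set.update seen ls).map (fun l => (l, g l)), PySem.Set.update seen ls) := by
  induction ls generalizing seen with
  | nil => rfl
  | cons l rest ih =>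
    simp only [List.foldl_cons]
    have hupd : PySem.Set.update seen (l :: rest) = PySem.Set.update (PySem.Set.add seen l) rest := by
      simp [PySem.Set.update]
    by_cases h : PySem.Set.contains seen l = true
    · rw [if_pos h, hupd]
      have hm : l ∈ seen := by simpa using h
      have hadd : PySem.Set.add seen l = seen := by simp [PySem.Set.add, hm]
      rw [hadd]; exact ih seen
    · rw [if_neg h, hupd]
      have hm : l ∉ seen := by simpa using h
      have hadd : PySem.Set.add seen l = seen ++ [l] := by simp [PySem.Set.add, hm]
      have := ih (PySem.Set.add seen l)
      rw [hadd] at this ⊢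
      simpa using this

-- A value inserted for a key depends only on the key, so repeated inserts agree.
theorem pvGetD_foldl_insert (f : String → List Int) (ls : List String)
    (d : PySem.Dict String (List Int)) (k : String) :
    (ls.foldl (fun d l => d.insert l (f l)) d).getD k [] =
      if k ∈ ls then f k else d.getD k [] := by
  induction ls generalizing d with
  | nil => simp
  | cons l rest ih =>
    simp only [List.foldl_cons, ih, List.mem_cons]
    by_cases hr : k ∈ rest
    · simp [hr]
    · by_cases hk : k = l
      · simp [hk]
      · simp [hr, hk, PySem.Dict.getD_insert]

-- dict(items) on a nodup-keyed pair list returns exactly that list.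
theorem pvOfList_items (S : List String) (g : String → List Int) (hnd : S.Nodup) :
    (PySem.Dict.ofList (S.map (fun l => (l, g l)))).items = S.map (fun l => (l, g l)) := by
  show (PySem.Dict.update _ _).items = _
  unfold PySem.Dict.update
  rw [PySem.Dict.items_foldl_insert_fresh _ Prod.fst Prod.snd _ (by simp)
        (by simp only [List.map_map]
            simpa [Function.comp_def] using hnd)]
  simp [Function.comp_def, show (PySem.Dict.empty : PySem.Dict String (List Int)).items = [] from rfl]

-- ===== VERDICT (by name: the statement is the Claim_ definition above) =====
theorem get_position_of_multiple_letters_opt_spec : Claim_equal_get_position_of_multiple_letters_opt := by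
  intro w ls _
  unfold Spec_get_position_of_multiple_letters_opt
  unfold get_position_of_multiple_letters_opt get_position_of_multiple_letters_opt_alt
  have hloop : (ls.foldl
        (fun (st : List (String × List Int) × PySem.Set String) l =>
          if PySem.Set.contains st.2 l then st
          else (st.1 ++ [(l, (pvIndexB w).getD l [])], PySem.Set.add st.2 l))
        ([], PySem.Set.empty)).1
      = (PySem.Set.update PySem.Set.empty ls).map (fun l => (l, (pvIndexB w).getD l [])) :=
    congrArg Prod.fst (pvLoopB (fun l => (pvIndexB w).getD l []) ls PySem.Set.empty)
  rw [hloop]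
  have hfun : (fun l => (l, (pvIndexB w).getD l [])) = fun l => (l, pvPositionsA w l) := by
    funext l; rw [pvValue_eq]
  have hS : (PySem.Set.update PySem.Set.empty ls : List String) = PySem.Set.ofList ls := rfl
  rw [hS, hfun, pvOfList_items _ _ (PySem.Set.nodup_ofList ls)]
  split
  · rename_i h
    have : ls = [] := by cases ls <;> simp_all
    subst this; rfl
  · rw [PySem.Dict.items_eq_map_keys _
        (PySem.Dict.nodup_keys_foldl_insert ls _ _ (by simp)) []]
    rw [PySem.Dict.keys_foldl_insert]
    rw [show ((PySem.Dict.empty : PySem.Dict String (List Int)).keys) = [] from rfl]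
    rw [show (PySem.Set.update ([] : List String) ls : List String) = PySem.Set.ofList ls from rfl]
    apply List.map_congr_left
    intro k hkmem
    have hkls : k ∈ ls := (PySem.Set.mem_ofList ls k).mp hkmem
    rw [pvGetD_foldl_insert]
    simp [hkls]
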